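-- pv_equiv track=rewrite | github.com/Shiv2157k/leet_code | data_structures/subsets.py | get_subsets__II
-- ===== SOURCE A (Python) =====
-- from typing import List
--
-- def get_subsets__II(nums: List[int]) -> List[List[int]]:
--     """
--     Approach: Lexographic binary sorting
--     Time Complexity: O(N * 2*N)
--     Space Complexity: O(N * 2*N)
--     :param nums:
--     :return:
--     """
--     n, subsets = len(nums), []
--     nums.sort()
--     for i in range(2**n, 2**(n + 1)):
--         bitmask = bin(i)[3:]
--         sets = []
--         for j in range(n):
--             if bitmask[j] == "1":
--                 sets.append(nums[j])
--         if sets not in subsets: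
--             subsets.append(sets)
--     return subsets
-- ===== SOURCE B (Python) =====
-- def get_subsets__II(nums):
--     # Same return value as A; also sorts nums in place like A does.
--     nums.sort()
--
--     # Generate ALL 2**n subsets once, recursively over suffixes of nums:
--     # subsets of nums[i:] = subsets of nums[i+1:] (nums[i] excluded, first)
--     # followed by the same subsets with nums[i] prepended.  This is exactly
--     # the bitmask enumeration order with nums[0] as the most significant bit.
--     def gen(i):
--         if i == len(nums):
--             return [[]]
--         rest = gen(i + 1)
--         return rest + [[nums[i]] + s for s in rest]
--
--     # Deduplicate keeping first occurrences with a dict (O(1) lookups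
--     # instead of A's O(#subsets) list-membership scan per subset).
--     seen = {}
--     for s in gen(0):
--         key = tuple(s)
--         if key not in seen:
--             seen[key] = s
--     return list(seen.values())
-- ===== Notes on version B (the rewrite author's own statement) =====
-- stated objective: alternative
-- what changed: Replaces the bitmask loop with per-index bin()-string scanning and the 'sets not in subsets' list-membership dedup by a recursive suffix-doubling generation of all subsets followed by a dict-based first-occurrence dedup.
import Mathlib
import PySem

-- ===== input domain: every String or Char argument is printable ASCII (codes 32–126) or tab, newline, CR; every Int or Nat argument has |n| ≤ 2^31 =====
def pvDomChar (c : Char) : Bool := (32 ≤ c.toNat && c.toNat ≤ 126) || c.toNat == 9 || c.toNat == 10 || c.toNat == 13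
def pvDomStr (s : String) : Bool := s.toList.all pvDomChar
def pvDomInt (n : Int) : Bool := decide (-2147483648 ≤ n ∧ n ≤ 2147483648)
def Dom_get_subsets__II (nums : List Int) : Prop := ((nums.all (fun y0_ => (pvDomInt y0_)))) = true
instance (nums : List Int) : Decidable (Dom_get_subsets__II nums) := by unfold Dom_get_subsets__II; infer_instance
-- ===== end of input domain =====

-- B replaces A's bitmask/bin-string enumeration and quadratic list-membership dedup by a
-- recursive suffix-doubling generation of all subsets plus a dict-based first-occurrence
-- dedup (A also sorts nums in place; equivalence here is about the RETURN value; B's Python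
-- performs the same in-place sort).


-- ===== PORT A =====
def get_subsets__II (nums : List Int) : List (List Int) :=
  -- n, subsets = len(nums), []
  let n : Int := nums.length
  -- nums.sort()  (in-place in Python; the sorted list is used below)
  let numsS := PySem.List.sorted nums (fun x => x) false
  -- for i in range(2**n, 2**(n+1)):  (n = len(nums) ≥ 0, so 2**n is 2 ^ n.toNat exactly)
  (PySem.List.pyRange ((2 : Int) ^ n.toNat) ((2 : Int) ^ (n.toNat + 1)) 1).foldl (fun subsets i =>
    -- bitmask = bin(i)[3:]   (string kept as List Char; PySem string ops are defined on List Char)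
    let bitmask : List Char := PySem.List.slice (PySem.Int.toBinChars0b i) (some 3) none
    -- sets = []; for j in range(n): if bitmask[j] == "1": sets.append(nums[j])
    let sets := (PySem.List.pyRange 0 n 1).foldl (fun sets j =>
      if PySem.List.pyGet? bitmask j = some '1' then
        -- nums[j]: 0 ≤ j < n = len(nums), so the IndexError branch (getD default) is unreachable
        sets ++ [(PySem.List.pyGet? numsS j).getD 0]
      else sets) ([] : List Int)
    -- if sets not in subsets: subsets.append(sets)
    if sets ∈ subsets then subsets else subsets ++ [sets]) []

-- ===== PORT B =====
-- gen(i): subsets of nums[i:] = subsets of nums[i+1:] ++ the same with nums[i] prepended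
-- (B recurses on the index i into nums; here that is structural recursion on the suffix)
def pvGen : List Int → List (List Int)
  | [] => [[]]
  | x :: xs => let rest := pvGen xs; rest ++ rest.map (fun s => x :: s)

def get_subsets__II_alt (nums : List Int) : List (List Int) :=
  -- nums.sort()
  let numsS := PySem.List.sorted nums (fun x => x) false
  -- seen = {}; for s in gen(0): if tuple(s) not in seen: seen[tuple(s)] = s
  -- return list(seen.values())
  ((pvGen numsS).foldl (fun (seen : PySem.Dict (List Int) (List Int)) s =>
      if seen.contains s then seen else seen.insert s s) PySem.Dict.empty).values

-- ===== PRECONDITION & SPEC =====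
def Spec_get_subsets__II (nums : List Int) (out : List (List Int)) : Prop := out = get_subsets__II_alt nums
instance (nums : List Int) (out : List (List Int)) : Decidable (Spec_get_subsets__II nums out) := by unfold Spec_get_subsets__II; infer_instance

-- ===== CLAIM (what is proved, stated in full; the proofs are below) =====
def Claim_equal_get_subsets__II : Prop := ∀ (nums : List Int), Dom_get_subsets__II nums → Spec_get_subsets__II nums (get_subsets__II nums)

-- ===== LEMMAS AND PROOFS =====

-- n-digit binary representation of k (MSB first): bin(2^n + k)[3:]
def pvPad : Nat → Nat → List Char
  | 0, _ => []
  | n + 1, k => pvPad n (k / 2) ++ [Nat.digitChar (k % 2)]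

-- minimal binary digits of n (MSB first) — a characterization of Nat.toDigits 2
def pvDigits : Nat → List Char
  | n => if h : n < 2 then [Nat.digitChar n] else pvDigits (n / 2) ++ [Nat.digitChar (n % 2)]
  decreasing_by exact Nat.div_lt_self (by omega) (by omega)

-- select xs[j] where the j-th digit is '1'
def pvSel : List Char → List Int → List Int
  | c :: cs, x :: xs => if c = '1' then x :: pvSel cs xs else pvSel cs xs
  | _, _ => []

theorem pvDigits_eq (n : Nat) :
    pvDigits n = if n < 2 then [Nat.digitChar n] else pvDigits (n / 2) ++ [Nat.digitChar (n % 2)] := by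
  by_cases h : n < 2 <;> rw [pvDigits] <;> simp [h]

theorem pvPad_length (n k : Nat) : (pvPad n k).length = n := by
  induction n generalizing k with
  | zero => rfl
  | succ n ih => simp [pvPad, ih]

theorem pvToDigitsCore_eq (fuel n : Nat) (acc : List Char) (h : n < fuel) :
    Nat.toDigitsCore 2 fuel n acc = pvDigits n ++ acc := by
  induction fuel generalizing n acc with
  | zero => omega
  | succ f ih =>
    rw [Nat.toDigitsCore]
    by_cases h2 : n / 2 = 0
    · have hn : n < 2 := by omega
      simp only [h2, if_pos rfl]
      rw [pvDigits_eq]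
      simp [hn, Nat.mod_eq_of_lt hn]
    · have hn : ¬ n < 2 := by omega
      simp only [if_neg h2]
      rw [ih (n / 2) _ (by omega), pvDigits_eq n, if_neg hn]
      simp
theorem pvToDigits_eq (n : Nat) : Nat.toDigits 2 n = pvDigits n := by
  rw [Nat.toDigits, pvToDigitsCore_eq (n + 1) n [] (by omega)]
  simp

theorem pvDigits_pow_add (n k : Nat) (h : k < 2 ^ n) :
    pvDigits (2 ^ n + k) = '1' :: pvPad n k := by
  induction n generalizing k with
  | zero =>
    have : k = 0 := by omega
    subst this
    rw [show (2:Nat) ^ 0 + 0 = 1 from rfl, pvDigits_eq, if_pos (by omega)]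
    rfl
  | succ n ih =>
    have hge : ¬ (2 ^ (n + 1) + k < 2) := by have := Nat.one_le_two_pow (n := n + 1); omega
    rw [pvDigits_eq, if_neg hge]
    have hdiv : (2 ^ (n + 1) + k) / 2 = 2 ^ n + k / 2 := by omega
    have hmod : (2 ^ (n + 1) + k) % 2 = k % 2 := by omega
    rw [hdiv, hmod, ih (k / 2) (by omega)]
    conv_rhs => rw [show pvPad (n + 1) k = pvPad n (k / 2) ++ [Nat.digitChar (k % 2)] from rfl]
    simp

theorem pvPad_succ (n k : Nat) (h : k < 2 ^ (n + 1)) :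
    pvPad (n + 1) k = Nat.digitChar (k / 2 ^ n) :: pvPad n (k % 2 ^ n) := by
  induction n generalizing k with
  | zero =>
    have : k < 2 := by simpa using h
    simp [pvPad, Nat.mod_eq_of_lt this, Nat.div_one]
  | succ n ih =>
    have h2 : 2 ^ (n + 2) = 2 * 2 ^ (n + 1) := by ring
    rw [pvPad, ih (k / 2) (by omega), pvPad]
    have e1 : k / 2 / 2 ^ n = k / 2 ^ (n + 1) := by
      rw [Nat.div_div_eq_div_mul]; ring_nf
    have e2 : k / 2 % 2 ^ n = k % 2 ^ (n + 1) / 2 := by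
      have := Nat.mod_mul_right_div_self k 2 (2 ^ n)
      rw [show 2 * 2 ^ n = 2 ^ (n + 1) by ring] at this
      omega
    have e3 : k % 2 = k % 2 ^ (n + 1) % 2 := by
      rw [Nat.mod_mod_of_dvd k (by exact dvd_pow_self 2 (by omega))]
    rw [e1, e2, e3]
    simp

-- the inner j-loop is the digit-selection pvSel
theorem pv_inner_foldl (cs : List Char) (xs : List Int) (acc : List Int)
    (hlen : cs.length = xs.length) :
    (List.range xs.length).foldl
      (fun sets k => if cs[k]? = some '1' then sets ++ [xs[k]?.getD 0] else sets) acc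
    = acc ++ pvSel cs xs := by
  induction cs generalizing xs acc with
  | nil =>
    have : xs = [] := by simpa using (List.length_eq_zero_iff.mp hlen.symm)
    subst this; simp [pvSel]
  | cons c cs ih =>
    obtain ⟨x, xs', rfl⟩ : ∃ x xs', xs = x :: xs' := by
      cases xs with
      | nil => simp at hlen
      | cons a t => exact ⟨a, t, rfl⟩
    have hlen' : cs.length = xs'.length := by simpa using hlen
    rw [List.length_cons, List.range_succ_eq_map, List.foldl_cons, List.foldl_map]
    simp only [List.getElem?_cons_zero, List.getElem?_cons_succ, Option.getD_some]
    by_cases hc : c = '1'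
    · subst hc
      rw [if_pos rfl]
      rw [ih xs' (acc ++ [x]) hlen']
      simp [pvSel]
    · rw [if_neg (by simpa using hc)]
      rw [ih xs' acc hlen']
      simp [pvSel, hc]

-- the bitmask enumeration generates exactly pvGen
theorem pv_map_range_eq_pvGen (xs : List Int) :
    (List.range (2 ^ xs.length)).map (fun k => pvSel (pvPad xs.length k) xs) = pvGen xs := by
  induction xs with
  | nil => simp [pvGen, pvPad, pvSel]
  | cons x xs ih =>
    have h2 : 2 ^ (x :: xs).length = 2 ^ xs.length + 2 ^ xs.length := by
      simp [List.length_cons]; ring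
    rw [h2, List.range_add, List.map_append, List.map_map]
    have hlow : (List.range (2 ^ xs.length)).map (fun k => pvSel (pvPad (x :: xs).length k) (x :: xs))
        = (List.range (2 ^ xs.length)).map (fun k => pvSel (pvPad xs.length k) xs) := by
      apply List.map_congr_left
      intro k hk
      rw [List.mem_range] at hk
      rw [List.length_cons, pvPad_succ xs.length k (by omega), Nat.div_eq_of_lt hk,
        Nat.mod_eq_of_lt hk, show Nat.digitChar 0 = '0' from rfl]
      simp [pvSel]
    have hhigh : (List.range (2 ^ xs.length)).map
          ((fun k => pvSel (pvPad (x :: xs).length k) (x :: xs)) ∘ (fun k => 2 ^ xs.length + k))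
        = (List.range (2 ^ xs.length)).map (fun k => x :: pvSel (pvPad xs.length k) xs) := by
      apply List.map_congr_left
      intro k hk
      rw [List.mem_range] at hk
      have hlt : 2 ^ xs.length + k < 2 ^ (xs.length + 1) := by
        have : 2 ^ (xs.length + 1) = 2 ^ xs.length + 2 ^ xs.length := by ring
        omega
      simp only [Function.comp_apply, List.length_cons]
      rw [pvPad_succ xs.length _ hlt]
      have hd : (2 ^ xs.length + k) / 2 ^ xs.length = 1 := by
        rw [Nat.add_div_left _ (by positivity)]
        simp [Nat.div_eq_of_lt hk]
      have hm : (2 ^ xs.length + k) % 2 ^ xs.length = k := by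
        rw [Nat.add_mod_left, Nat.mod_eq_of_lt hk]
      rw [hd, hm, show Nat.digitChar 1 = '1' from rfl]
      simp [pvSel]
    rw [hlow, hhigh,
      show (fun k => x :: pvSel (pvPad xs.length k) xs)
         = ((fun s => x :: s) ∘ (fun k => pvSel (pvPad xs.length k) xs)) from rfl,
      ← List.map_map, ih]
    rfl

-- bin(2^n + k)[3:] is the n-digit binary string of k
theorem pv_bm (L k : Nat) (hk : k < 2 ^ L) :
    PySem.List.slice (PySem.Int.toBinChars0b ((2 ^ L + k : Nat) : Int)) (some 3) none
    = pvPad L k := by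
  have h0 : ¬ (((2 ^ L + k : Nat) : Int) < 0) := by
    exact not_lt.mpr (Int.natCast_nonneg _)
  simp only [PySem.Int.toBinChars0b, if_neg h0, Int.toNat_natCast]
  rw [pvToDigits_eq, pvDigits_pow_add L k hk,
    PySem.List.slice_from _ (by norm_num : (0:Int) ≤ 3)]
  rfl

-- the whole body of A's outer loop at i = 2^len + k
theorem pv_body_eq (ys : List Int) (k : Nat) (hk : k < 2 ^ ys.length) :
    (PySem.List.pyRange 0 (ys.length : Int) 1).foldl (fun sets j =>
        if PySem.List.pyGet?
             (PySem.List.slice (PySem.Int.toBinChars0b ((2 ^ ys.length + k : Nat) : Int)) (some 3) none)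
             j = some '1'
        then sets ++ [(PySem.List.pyGet? ys j).getD 0] else sets) ([] : List Int)
    = pvSel (pvPad ys.length k) ys := by
  rw [pv_bm ys.length k hk, PySem.List.pyRange_zero_nat, List.foldl_map]
  simp only [PySem.List.pyGet?_natCast]
  exact pv_inner_foldl (pvPad ys.length k) ys [] (by rw [pvPad_length])

-- A's outer loop, on the already-sorted list
theorem pv_A_loop (ys : List Int) :
    (PySem.List.pyRange ((2 : Int) ^ ys.length) ((2 : Int) ^ (ys.length + 1)) 1).foldl
      (fun subsets i =>
        if (PySem.List.pyRange 0 (ys.length : Int) 1).foldl (fun sets j =>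
              if PySem.List.pyGet? (PySem.List.slice (PySem.Int.toBinChars0b i) (some 3) none) j
                   = some '1'
              then sets ++ [(PySem.List.pyGet? ys j).getD 0] else sets) ([] : List Int) ∈ subsets
        then subsets
        else subsets ++ [(PySem.List.pyRange 0 (ys.length : Int) 1).foldl (fun sets j =>
              if PySem.List.pyGet? (PySem.List.slice (PySem.Int.toBinChars0b i) (some 3) none) j
                   = some '1'
              then sets ++ [(PySem.List.pyGet? ys j).getD 0] else sets) ([] : List Int)]) []
    = (pvGen ys).foldl (fun acc s => if s ∈ acc then acc else acc ++ [s]) [] := by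
  rw [PySem.List.pyRange_one ((2 : Int) ^ ys.length) ((2 : Int) ^ (ys.length + 1))]
  have ha : (2 : Int) ^ ys.length = ((2 ^ ys.length : Nat) : Int) := by push_cast; ring
  have hcnt : ((2 : Int) ^ (ys.length + 1) - (2 : Int) ^ ys.length).toNat = 2 ^ ys.length := by
    rw [show (2 : Int) ^ (ys.length + 1) = 2 ^ ys.length + 2 ^ ys.length from by ring,
      add_sub_cancel_right, ha, Int.toNat_natCast]
  rw [hcnt, List.foldl_map]
  refine (PySem.List.foldl_congr_mem _ _
    (fun acc k => if pvSel (pvPad ys.length k) ys ∈ acc then acc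
                  else acc ++ [pvSel (pvPad ys.length k) ys]) _ ?_).trans ?_
  · intro acc k hk
    rw [List.mem_range] at hk
    simp only
    rw [show (2 : Int) ^ ys.length + (k : Int) = ((2 ^ ys.length + k : Nat) : Int) from by
          push_cast; ring,
      pv_body_eq ys k hk]
  · conv_rhs => rw [← pv_map_range_eq_pvGen ys]
    simp only [List.foldl_map]

theorem pv_A_eq (nums : List Int) :
    get_subsets__II nums
    = (pvGen (PySem.List.sorted nums (fun x => x) false)).foldl
        (fun acc s => if s ∈ acc then acc else acc ++ [s]) [] := by
  simp only [get_subsets__II, Int.toNat_natCast]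
  rw [show nums.length = (PySem.List.sorted nums (fun x => x) false).length from
    (PySem.List.length_sorted nums (fun x => x) false).symm]
  exact pv_A_loop (PySem.List.sorted nums (fun x => x) false)

-- the dict loop in B computes the same first-occurrence dedup as A's membership loop
theorem pv_dict_dedup (L : List (List Int)) (d : PySem.Dict (List Int) (List Int))
    (acc : List (List Int)) (h : d.items = acc.map (fun s => (s, s))) :
    (L.foldl (fun seen s => if seen.contains s then seen else seen.insert s s) d).values
    = L.foldl (fun acc s => if s ∈ acc then acc else acc ++ [s]) acc := by
  induction L generalizing d acc with
  | nil =>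
    simp [PySem.Dict.values, h, List.map_map, Function.comp_def]
  | cons s L ih =>
    have hkeys : d.keys = acc := by
      simp [PySem.Dict.keys, h, List.map_map, Function.comp_def]
    have hcont : d.contains s = true ↔ s ∈ acc := by
      rw [PySem.Dict.contains_iff_mem_keys, hkeys]
    by_cases hm : s ∈ acc
    · rw [List.foldl_cons, List.foldl_cons, if_pos (hcont.mpr hm), if_pos hm]
      exact ih d acc h
    · have hc : d.contains s = false := by
        cases hcd : d.contains s
        · rfl
        · exact absurd (hcont.mp hcd) hm
      rw [List.foldl_cons, List.foldl_cons, if_neg (by simp [hc]), if_neg hm]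
      apply ih
      rw [PySem.Dict.items_insert_of_not_contains _ _ hc, h]
      simp

theorem pv_B_eq (nums : List Int) :
    get_subsets__II_alt nums
    = (pvGen (PySem.List.sorted nums (fun x => x) false)).foldl
        (fun acc s => if s ∈ acc then acc else acc ++ [s]) [] := by
  unfold get_subsets__II_alt
  exact pv_dict_dedup _ _ _ (by simp [PySem.Dict.empty])

-- ===== VERDICT (by name: the statement is the Claim_ definition above) =====
theorem get_subsets__II_spec : Claim_equal_get_subsets__II := by
  intro nums _
  unfold Spec_get_subsets__II
  rw [pv_A_eq, pv_B_eq]
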